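-- pv_equiv track=rewrite | github.com/abhibansal530/Ultimate-Tic-Tac-Toe | team3.py | checkBlockCompletePartial
-- ===== SOURCE A (Python) =====
-- def checkBlockCompletePartial(board, position, flag, req):
--     """
--     returns the count of the two complete position in any row, col or diag
--     """
--     count =0
--     row , col = position[0]%3, position[1]%3
--
--     for i in range(0,3):
--         tempCount = countInRow(board, flag, i, row, col)
--         if tempCount == req:
--             count += 1
--
--     for j in range(0,3):
--         tempCount = countInCol(board, flag, j, row, col)
--         if tempCount == req:
--             count += 1
--
--     tempCount = countInOnDiag(board,flag, row, col)
--     if tempCount == req: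
--         count += 1
--
--     tempCount = countInOffDiag(board, flag, row, col)
--     if tempCount == req:
--         count += 1
--
--     return count
--
-- def countInRow(board, flag, i, row, col):
--     tempCount =0
--     for j in range(0, 3):
--         if board[row*3 + i][col*3 + j] == flag :
--             tempCount += 1
--         elif board[row*3+i][col*3+j] == negateFlag(flag):
--             tempCount -= 1
--     return tempCount
--
-- def countInCol(board, flag, j, row, col):
--     tempCount = 0
--     for i in range(0,3):
--         if board[row*3 + i][col*3+j] == flag:
--             tempCount += 1
--         elif board[row*3 +i][col*3+j] == negateFlag(flag):
--             tempCount -= 1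
--
--     return tempCount
--
-- def countInOnDiag(board, flag, row, col):
--     tempCount = 0
--     for i in range(0,3):
--         if board[row*3+i][col*3+i] == flag:
--             tempCount += 1
--         elif board[row*3 +i][col*3+ i] == negateFlag(flag):
--             tempCount -= 1
--
--     return tempCount
--
-- def countInOffDiag(board, flag, row, col):
--     tempCount = 0
--     for i in range(0,3):
--         if board[row*3+2-i][col*3+i] == flag :
--             tempCount += 1
--         elif board[row*3+2-i][col*3+i] == negateFlag(flag):
--             tempCount -= 1
--
--     return tempCount
--
-- def negateFlag(flag):
--     if flag == 'x':
--         return 'o'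
--     else :
--         return 'x'
-- ===== SOURCE B (Python) =====
-- def checkBlockCompletePartial(board, position, flag, req):
--     # Single pass over the 9 cells of the block: each cell's +1/-1/0 value is
--     # accumulated at once into every line it belongs to (its row, its column,
--     # and a diagonal when applicable), then the 8 finished scores are compared
--     # with req.  A instead rescans the block once per line.
--     row, col = position[0] % 3, position[1] % 3
--     neg = 'o' if flag == 'x' else 'x'
--     # scores[0..2]: rows, scores[3..5]: cols, scores[6]: main diag, scores[7]: anti diag
--     scores = [0, 0, 0, 0, 0, 0, 0, 0]
--     for i in range(3):
--         for j in range(3):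
--             cell = board[row * 3 + i][col * 3 + j]
--             v = 1 if cell == flag else (-1 if cell == neg else 0)
--             scores[i] += v
--             scores[3 + j] += v
--             if i == j:
--                 scores[6] += v
--             if i + j == 2:
--                 scores[7] += v
--     return sum(1 for s in scores if s == req)
-- ===== Notes on version B (the rewrite author's own statement) =====
-- stated objective: alternative
-- what changed: Instead of A's eight separate per-line scans (4 helper functions rescanning the block, each cell read 2-4 times), B makes a single pass over the 9 cells, accumulating each cell's +1/-1/0 value into all lines it belongs to in one 8-entry score table, then counts scores equal to req.
import Mathlib
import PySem

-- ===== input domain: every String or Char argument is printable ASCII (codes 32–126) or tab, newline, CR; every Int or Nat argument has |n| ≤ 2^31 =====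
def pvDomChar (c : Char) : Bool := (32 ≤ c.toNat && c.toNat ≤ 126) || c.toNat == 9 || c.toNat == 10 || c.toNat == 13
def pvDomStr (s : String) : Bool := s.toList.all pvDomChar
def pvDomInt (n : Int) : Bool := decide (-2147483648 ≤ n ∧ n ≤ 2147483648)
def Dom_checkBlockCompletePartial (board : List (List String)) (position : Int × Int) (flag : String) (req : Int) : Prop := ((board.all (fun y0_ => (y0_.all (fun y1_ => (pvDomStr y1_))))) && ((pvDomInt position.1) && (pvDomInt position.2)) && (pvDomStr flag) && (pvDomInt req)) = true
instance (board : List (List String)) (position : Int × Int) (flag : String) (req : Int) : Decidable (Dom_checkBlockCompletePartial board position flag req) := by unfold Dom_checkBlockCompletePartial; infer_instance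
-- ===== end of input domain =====

-- B makes a single pass over the 9 block cells, accumulating each cell's +1/-1/0 value
-- into all 8 line scores at once, instead of A's eight separate per-line rescans (alternative).

-- ===== PORT A =====
-- board[r][c]; out-of-range reads yield a default — Pre_ excludes exactly those inputs (Python raises IndexError there)
def pvCell (board : List (List String)) (r c : Int) : String :=
  (PySem.List.pyGet? ((PySem.List.pyGet? board r).getD []) c).getD ""

def negateFlagP (flag : String) : String :=
  if flag == "x" then "o" else "x"

def countInRow (board : List (List String)) (flag : String) (i row col : Int) : Int :=
  (PySem.List.pyRange 0 3 1).foldl (fun t j =>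
    if pvCell board (row*3 + i) (col*3 + j) == flag then t + 1
    else if pvCell board (row*3 + i) (col*3 + j) == negateFlagP flag then t - 1
    else t) 0

def countInCol (board : List (List String)) (flag : String) (j row col : Int) : Int :=
  (PySem.List.pyRange 0 3 1).foldl (fun t i =>
    if pvCell board (row*3 + i) (col*3 + j) == flag then t + 1
    else if pvCell board (row*3 + i) (col*3 + j) == negateFlagP flag then t - 1
    else t) 0

def countInOnDiag (board : List (List String)) (flag : String) (row col : Int) : Int :=
  (PySem.List.pyRange 0 3 1).foldl (fun t i =>
    if pvCell board (row*3 + i) (col*3 + i) == flag then t + 1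
    else if pvCell board (row*3 + i) (col*3 + i) == negateFlagP flag then t - 1
    else t) 0

def countInOffDiag (board : List (List String)) (flag : String) (row col : Int) : Int :=
  (PySem.List.pyRange 0 3 1).foldl (fun t i =>
    if pvCell board (row*3 + 2 - i) (col*3 + i) == flag then t + 1
    else if pvCell board (row*3 + 2 - i) (col*3 + i) == negateFlagP flag then t - 1
    else t) 0

def checkBlockCompletePartial (board : List (List String)) (position : Int × Int) (flag : String) (req : Int) : Int :=
  let row := PySem.Int.mod position.1 3
  let col := PySem.Int.mod position.2 3
  let count : Int := 0
  let count := (PySem.List.pyRange 0 3 1).foldl (fun count i =>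
    if countInRow board flag i row col == req then count + 1 else count) count
  let count := (PySem.List.pyRange 0 3 1).foldl (fun count j =>
    if countInCol board flag j row col == req then count + 1 else count) count
  let count := if countInOnDiag board flag row col == req then count + 1 else count
  let count := if countInOffDiag board flag row col == req then count + 1 else count
  count

-- ===== PORT B =====
-- scores[k] += v  (Python list index assignment)
def pvBump (s : List Int) (k : Nat) (v : Int) : List Int := s.set k (s.getD k 0 + v)

-- the body of Source B's nested 'for i / for j' loop: fold one cell into the score list
def altStep (board : List (List String)) (flag neg : String) (row col : Int) (s : List Int) (i j : Int) : List Int :=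
  let cell := pvCell board (row*3 + i) (col*3 + j)
  let v : Int := if cell == flag then 1 else if cell == neg then -1 else 0
  let s := pvBump s i.toNat v
  let s := pvBump s (3 + j.toNat) v
  let s := if i == j then pvBump s 6 v else s
  let s := if i + j == 2 then pvBump s 7 v else s
  s

-- the nested 'for i / for j' accumulation loop of Source B over the 8-entry score list
def altScores (board : List (List String)) (flag neg : String) (row col : Int) : List Int :=
  (PySem.List.pyRange 0 3 1).foldl (fun s i =>
    (PySem.List.pyRange 0 3 1).foldl (fun s j =>
      altStep board flag neg row col s i j) s) [0, 0, 0, 0, 0, 0, 0, 0]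

def checkBlockCompletePartial_alt (board : List (List String)) (position : Int × Int) (flag : String) (req : Int) : Int :=
  let row := PySem.Int.mod position.1 3
  let col := PySem.Int.mod position.2 3
  let neg := if flag == "x" then "o" else "x"
  let scores := altScores board flag neg row col
  scores.foldl (fun c sc => if sc == req then c + 1 else c) 0

-- ===== PRECONDITION & SPEC =====
-- Pre_: the 9 cells of the selected 3x3 block exist (otherwise Python A raises IndexError)
def Pre_checkBlockCompletePartial (board : List (List String)) (position : Int × Int) (flag : String) (req : Int) : Prop :=
  PySem.Int.mod position.1 3 * 3 + 3 ≤ (board.length : Int) ∧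
  ∀ rw ∈ (board.drop (PySem.Int.mod position.1 3 * 3).toNat).take 3,
    PySem.Int.mod position.2 3 * 3 + 3 ≤ (rw.length : Int)
instance (board : List (List String)) (position : Int × Int) (flag : String) (req : Int) : Decidable (Pre_checkBlockCompletePartial board position flag req) := by unfold Pre_checkBlockCompletePartial; infer_instance

def pvWitness_checkBlockCompletePartial : List (List String) × (Int × Int) × String × Int :=
  ([["x","o","x"],["o","x","o"],["x","",""]], (0, 0), "x", 1)

def Spec_checkBlockCompletePartial (board : List (List String)) (position : Int × Int) (flag : String) (req : Int) (out : Int) : Prop := out = checkBlockCompletePartial_alt board position flag req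
instance (board : List (List String)) (position : Int × Int) (flag : String) (req : Int) (out : Int) : Decidable (Spec_checkBlockCompletePartial board position flag req out) := by unfold Spec_checkBlockCompletePartial; infer_instance

-- ===== CLAIM (what is proved, stated in full; the proofs are below) =====
def Claim_equal_checkBlockCompletePartial : Prop := ∀ (board : List (List String)) (position : Int × Int) (flag : String) (req : Int), Dom_checkBlockCompletePartial board position flag req → Pre_checkBlockCompletePartial board position flag req → Spec_checkBlockCompletePartial board position flag req (checkBlockCompletePartial board position flag req)

-- ===== LEMMAS AND PROOFS =====
theorem pvRange3 : PySem.List.pyRange 0 3 1 = [0, 1, 2] := by decide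

-- the +1/-1/0 value of one cell (proof-only abbreviation)
def pvVal (board : List (List String)) (flag neg : String) (row col i j : Int) : Int :=
  if pvCell board (row*3 + i) (col*3 + j) == flag then 1
  else if pvCell board (row*3 + i) (col*3 + j) == neg then -1
  else 0

theorem countInRow_eq (board : List (List String)) (flag : String) (i row col : Int) :
    countInRow board flag i row col
      = 0 + pvVal board flag (negateFlagP flag) row col i 0 + pvVal board flag (negateFlagP flag) row col i 1 + pvVal board flag (negateFlagP flag) row col i 2 := by
  simp only [countInRow, pvRange3, List.foldl, pvVal]
  norm_num
  split_ifs <;> omega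

theorem countInCol_eq (board : List (List String)) (flag : String) (j row col : Int) :
    countInCol board flag j row col
      = 0 + pvVal board flag (negateFlagP flag) row col 0 j + pvVal board flag (negateFlagP flag) row col 1 j + pvVal board flag (negateFlagP flag) row col 2 j := by
  simp only [countInCol, pvRange3, List.foldl, pvVal]
  norm_num
  split_ifs <;> omega

theorem countInOnDiag_eq (board : List (List String)) (flag : String) (row col : Int) :
    countInOnDiag board flag row col
      = 0 + pvVal board flag (negateFlagP flag) row col 0 0 + pvVal board flag (negateFlagP flag) row col 1 1 + pvVal board flag (negateFlagP flag) row col 2 2 := by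
  simp only [countInOnDiag, pvRange3, List.foldl, pvVal]
  norm_num
  split_ifs <;> omega

theorem countInOffDiag_eq (board : List (List String)) (flag : String) (row col : Int) :
    countInOffDiag board flag row col
      = 0 + pvVal board flag (negateFlagP flag) row col 2 0 + pvVal board flag (negateFlagP flag) row col 1 1 + pvVal board flag (negateFlagP flag) row col 0 2 := by
  simp only [countInOffDiag, pvRange3, List.foldl, pvVal]
  norm_num
  have e1 : row * 3 + 2 - (1 : Int) = row * 3 + 1 := by ring
  simp only [e1]
  split_ifs <;> omega

theorem altStep_00 (board : List (List String)) (flag neg : String) (row col : Int) (a b c d e f g h : Int) :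
    altStep board flag neg row col [a, b, c, d, e, f, g, h] 0 0
      = [a + pvVal board flag neg row col 0 0, b, c, d + pvVal board flag neg row col 0 0, e, f, g + pvVal board flag neg row col 0 0, h] := by rfl

theorem altStep_01 (board : List (List String)) (flag neg : String) (row col : Int) (a b c d e f g h : Int) :
    altStep board flag neg row col [a, b, c, d, e, f, g, h] 0 1
      = [a + pvVal board flag neg row col 0 1, b, c, d, e + pvVal board flag neg row col 0 1, f, g, h] := by rfl

theorem altStep_02 (board : List (List String)) (flag neg : String) (row col : Int) (a b c d e f g h : Int) :
    altStep board flag neg row col [a, b, c, d, e, f, g, h] 0 2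
      = [a + pvVal board flag neg row col 0 2, b, c, d, e, f + pvVal board flag neg row col 0 2, g, h + pvVal board flag neg row col 0 2] := by rfl

theorem altStep_10 (board : List (List String)) (flag neg : String) (row col : Int) (a b c d e f g h : Int) :
    altStep board flag neg row col [a, b, c, d, e, f, g, h] 1 0
      = [a, b + pvVal board flag neg row col 1 0, c, d + pvVal board flag neg row col 1 0, e, f, g, h] := by rfl

theorem altStep_11 (board : List (List String)) (flag neg : String) (row col : Int) (a b c d e f g h : Int) :
    altStep board flag neg row col [a, b, c, d, e, f, g, h] 1 1
      = [a, b + pvVal board flag neg row col 1 1, c, d, e + pvVal board flag neg row col 1 1, f, g + pvVal board flag neg row col 1 1, h + pvVal board flag neg row col 1 1] := by rfl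

theorem altStep_12 (board : List (List String)) (flag neg : String) (row col : Int) (a b c d e f g h : Int) :
    altStep board flag neg row col [a, b, c, d, e, f, g, h] 1 2
      = [a, b + pvVal board flag neg row col 1 2, c, d, e, f + pvVal board flag neg row col 1 2, g, h] := by rfl

theorem altStep_20 (board : List (List String)) (flag neg : String) (row col : Int) (a b c d e f g h : Int) :
    altStep board flag neg row col [a, b, c, d, e, f, g, h] 2 0
      = [a, b, c + pvVal board flag neg row col 2 0, d + pvVal board flag neg row col 2 0, e, f, g, h + pvVal board flag neg row col 2 0] := by rfl

theorem altStep_21 (board : List (List String)) (flag neg : String) (row col : Int) (a b c d e f g h : Int) :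
    altStep board flag neg row col [a, b, c, d, e, f, g, h] 2 1
      = [a, b, c + pvVal board flag neg row col 2 1, d, e + pvVal board flag neg row col 2 1, f, g, h] := by rfl

theorem altStep_22 (board : List (List String)) (flag neg : String) (row col : Int) (a b c d e f g h : Int) :
    altStep board flag neg row col [a, b, c, d, e, f, g, h] 2 2
      = [a, b, c + pvVal board flag neg row col 2 2, d, e, f + pvVal board flag neg row col 2 2, g + pvVal board flag neg row col 2 2, h] := by rfl

theorem alt_scores (board : List (List String)) (flag neg : String) (row col : Int) :
    altScores board flag neg row col
    = [0 + pvVal board flag neg row col 0 0 + pvVal board flag neg row col 0 1 + pvVal board flag neg row col 0 2,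
       0 + pvVal board flag neg row col 1 0 + pvVal board flag neg row col 1 1 + pvVal board flag neg row col 1 2,
       0 + pvVal board flag neg row col 2 0 + pvVal board flag neg row col 2 1 + pvVal board flag neg row col 2 2,
       0 + pvVal board flag neg row col 0 0 + pvVal board flag neg row col 1 0 + pvVal board flag neg row col 2 0,
       0 + pvVal board flag neg row col 0 1 + pvVal board flag neg row col 1 1 + pvVal board flag neg row col 2 1,
       0 + pvVal board flag neg row col 0 2 + pvVal board flag neg row col 1 2 + pvVal board flag neg row col 2 2,
       0 + pvVal board flag neg row col 0 0 + pvVal board flag neg row col 1 1 + pvVal board flag neg row col 2 2,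
       0 + pvVal board flag neg row col 0 2 + pvVal board flag neg row col 1 1 + pvVal board flag neg row col 2 0] := by
  simp only [altScores, pvRange3, List.foldl, altStep_00, altStep_01, altStep_02, altStep_10, altStep_11, altStep_12, altStep_20, altStep_21, altStep_22]

-- ===== VERDICT (by name: the statement is the Claim_ definition above) =====
theorem checkBlockCompletePartial_spec : Claim_equal_checkBlockCompletePartial := by
  intro board position flag req _ _
  unfold Spec_checkBlockCompletePartial checkBlockCompletePartial checkBlockCompletePartial_alt
  simp only [pvRange3, List.foldl, alt_scores, countInRow_eq, countInCol_eq,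
    countInOnDiag_eq, countInOffDiag_eq, negateFlagP]
  have hanti : (0:Int) + pvVal board flag (if flag == "x" then "o" else "x") (PySem.Int.mod position.1 3) (PySem.Int.mod position.2 3) 2 0
      + pvVal board flag (if flag == "x" then "o" else "x") (PySem.Int.mod position.1 3) (PySem.Int.mod position.2 3) 1 1
      + pvVal board flag (if flag == "x" then "o" else "x") (PySem.Int.mod position.1 3) (PySem.Int.mod position.2 3) 0 2
      = 0 + pvVal board flag (if flag == "x" then "o" else "x") (PySem.Int.mod position.1 3) (PySem.Int.mod position.2 3) 0 2
      + pvVal board flag (if flag == "x" then "o" else "x") (PySem.Int.mod position.1 3) (PySem.Int.mod position.2 3) 1 1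
      + pvVal board flag (if flag == "x" then "o" else "x") (PySem.Int.mod position.1 3) (PySem.Int.mod position.2 3) 2 0 := by ring
  rw [hanti]
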